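-- pv_equiv track=rewrite | github.com/iasmimtx/Questoes-p1 | Questoes/maiorpalavrafrase.py | soma_diminui_vizinhos
-- ===== SOURCE A (Python) =====
-- def soma_diminui_vizinhos(valores):
--     valor = 0
--     for i in range(len(valores)):
--         if valores == []:
--             valor = 0
--         if valores[i] % 3 == 0:
--             valor -= valores[i]
--         else:
--             valor += valores[i]
--     return valor
-- ===== SOURCE B (Python) =====
-- def soma_diminui_vizinhos(valores):
--     total = sum(valores)
--     mult3 = sum(v for v in valores if v % 3 == 0)
--     return total - 2 * mult3
-- ===== Notes on version B (the rewrite author's own statement) =====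
-- stated objective: simpler
-- what changed: Replaces the signed per-element accumulation (with its dead empty-list check) by two plain sums: total minus twice the sum of the multiples of 3, using that flipping an element's sign changes the result by -2v.
import Mathlib
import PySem

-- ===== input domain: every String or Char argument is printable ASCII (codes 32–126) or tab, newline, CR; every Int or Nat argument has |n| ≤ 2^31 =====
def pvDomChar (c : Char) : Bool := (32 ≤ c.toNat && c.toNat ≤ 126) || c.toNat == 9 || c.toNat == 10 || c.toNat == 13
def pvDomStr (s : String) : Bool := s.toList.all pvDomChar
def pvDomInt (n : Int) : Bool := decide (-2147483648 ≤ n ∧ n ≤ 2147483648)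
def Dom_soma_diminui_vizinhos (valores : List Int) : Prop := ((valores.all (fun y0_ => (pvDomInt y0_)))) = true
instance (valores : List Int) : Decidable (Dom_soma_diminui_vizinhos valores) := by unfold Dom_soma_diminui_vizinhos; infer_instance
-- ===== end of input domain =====

-- B computes the same value as two plain sums (total minus twice the sum of the multiples of 3)
-- instead of A's signed per-element accumulation; objective: simpler.

-- ===== PORT A =====
def soma_diminui_vizinhos (valores : List Int) : Int :=
  (PySem.List.pyRange 0 (valores.length : Int) 1).foldl
    (fun valor i =>
      let valor := if valores = [] then 0 else valor
      let v := PySem.List.pyGetD valores i 0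
      if PySem.Int.mod v 3 = 0 then valor - v else valor + v) 0

-- ===== PORT B =====
def soma_diminui_vizinhos_alt (valores : List Int) : Int :=
  let total := valores.foldl (· + ·) 0
  let mult3 := (valores.filter (fun v => PySem.Int.mod v 3 = 0)).foldl (· + ·) 0
  total - 2 * mult3

-- ===== PRECONDITION & SPEC =====
def Spec_soma_diminui_vizinhos (valores : List Int) (out : Int) : Prop := out = soma_diminui_vizinhos_alt valores
instance (valores : List Int) (out : Int) : Decidable (Spec_soma_diminui_vizinhos valores out) := by unfold Spec_soma_diminui_vizinhos; infer_instance

-- ===== CLAIM (what is proved, stated in full; the proofs are below) =====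
def Claim_equal_soma_diminui_vizinhos : Prop := ∀ (valores : List Int), Dom_soma_diminui_vizinhos valores → Spec_soma_diminui_vizinhos valores (soma_diminui_vizinhos valores)

-- ===== LEMMAS AND PROOFS =====

-- sum fold with an arbitrary initial accumulator
lemma pv_sum_shift (xs : List Int) (c : Int) :
    xs.foldl (· + ·) c = c + xs.foldl (· + ·) 0 := by
  induction xs generalizing c with
  | nil => simp
  | cons x xs ih => simp only [List.foldl_cons, ih (c + x), ih x, zero_add]; ring

-- A's loop body, over list elements (the dead 'valores == []' check removed; valid for nonempty input)
lemma pv_foldl_char (xs : List Int) (c : Int) :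
    xs.foldl (fun valor v => if PySem.Int.mod v 3 = 0 then valor - v else valor + v) c
      = c + xs.foldl (· + ·) 0 - 2 * ((xs.filter (fun v => PySem.Int.mod v 3 = 0)).foldl (· + ·) 0) := by
  induction xs generalizing c with
  | nil => simp
  | cons x xs ih =>
    simp only [List.foldl_cons, List.filter_cons]
    by_cases h : PySem.Int.mod x 3 = 0 <;>
      simp only [h, if_true, if_false, decide_true, decide_false, Bool.false_eq_true, ih, pv_sum_shift xs x,
        pv_sum_shift _ x, List.foldl_cons, zero_add] <;> ring

-- ===== VERDICT (by name: the statement is the Claim_ definition above) =====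
theorem soma_diminui_vizinhos_spec : Claim_equal_soma_diminui_vizinhos := by
  intro valores _
  show _ = _
  rcases valores with _ | ⟨x, xs⟩
  · simp [soma_diminui_vizinhos, soma_diminui_vizinhos_alt, PySem.List.pyRange]
  · simp only [soma_diminui_vizinhos, soma_diminui_vizinhos_alt, reduceCtorEq, if_false]
    rw [PySem.List.foldl_pyRange_zero_pyGetD' (x :: xs) 0
      (fun valor v => if PySem.Int.mod v 3 = 0 then valor - v else valor + v) 0]
    rw [pv_foldl_char]
    ring
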